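-- pv_equiv track=rewrite | github.com/xiaoschannel/papertrail | pages/ingest/file_index.py | _compute_groups
-- ===== SOURCE A (Python) =====
-- def _compute_groups(k: list[str], lnk: list[bool]) -> list[list[str]]:
--     if not k:
--         return []
--     groups: list[list[str]] = []
--     current = [k[0]]
--     for i in range(1, len(k)):
--         if i - 1 < len(lnk) and lnk[i - 1]:
--             current.append(k[i])
--         else:
--             groups.append(current)
--             current = [k[i]]
--     groups.append(current)
--     return groups
-- ===== SOURCE B (Python) =====
-- def _compute_groups(k: list[str], lnk: list[bool]) -> list[list[str]]:
--     if not k: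
--         return []
--     bounds = [0]
--     for i in range(1, len(k)):
--         if not (i - 1 < len(lnk) and lnk[i - 1]):
--             bounds.append(i)
--     bounds.append(len(k))
--     return [k[a:b] for a, b in zip(bounds, bounds[1:])]
-- ===== Notes on version B (the rewrite author's own statement) =====
-- stated objective: alternative
-- what changed: B first collects the group boundary indices in one pass and then materialises each group as a slice k[a:b] over consecutive boundaries, instead of A's incremental current-group accumulator that appends element by element.
import Mathlib
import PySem

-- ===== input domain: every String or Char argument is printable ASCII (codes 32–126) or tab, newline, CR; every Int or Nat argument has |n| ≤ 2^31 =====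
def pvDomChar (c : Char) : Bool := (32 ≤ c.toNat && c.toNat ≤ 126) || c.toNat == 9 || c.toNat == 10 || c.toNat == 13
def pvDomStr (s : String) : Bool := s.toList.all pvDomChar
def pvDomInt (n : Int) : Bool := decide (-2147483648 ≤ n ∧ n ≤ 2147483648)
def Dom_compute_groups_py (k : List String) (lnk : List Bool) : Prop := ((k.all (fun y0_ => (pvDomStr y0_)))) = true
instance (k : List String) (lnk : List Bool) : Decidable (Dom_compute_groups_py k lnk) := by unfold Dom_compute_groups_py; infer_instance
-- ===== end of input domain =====

-- B collects group boundary indices in one pass and slices k between consecutive boundaries,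
-- instead of A's incremental current-group accumulator; same cost, different decomposition.


-- ===== PORT A =====
-- loop body of A's for-loop (state = (groups, current))
def pvStepA (k : List String) (lnk : List Bool) (st : List (List String) × List String) (i : Int) :
    List (List String) × List String :=
  if i - 1 < (lnk.length : Int) ∧ PySem.List.pyGetD lnk (i - 1) false = true then
    (st.1, st.2 ++ [PySem.List.pyGetD k i ""])
  else
    (st.1 ++ [st.2], [PySem.List.pyGetD k i ""])

def compute_groups_py (k : List String) (lnk : List Bool) : List (List String) :=
  match k with
  | [] => []
  | k0 :: _ =>
    let st := (PySem.List.pyRange 1 (k.length : Int) 1).foldl (pvStepA k lnk) ([], [k0])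
    st.1 ++ [st.2]

-- ===== PORT B =====
-- loop body of B's boundary-collecting loop
def pvStepB (lnk : List Bool) (bs : List Int) (i : Int) : List Int :=
  if ¬ (i - 1 < (lnk.length : Int) ∧ PySem.List.pyGetD lnk (i - 1) false = true) then
    bs ++ [i]
  else
    bs

def compute_groups_py_alt (k : List String) (lnk : List Bool) : List (List String) :=
  match k with
  | [] => []
  | _ :: _ =>
    let bounds := (PySem.List.pyRange 1 (k.length : Int) 1).foldl (pvStepB lnk) [0]
    let bounds := bounds ++ [(k.length : Int)]
    (bounds.zip bounds.tail).map (fun ab => PySem.List.slice k (some ab.1) (some ab.2))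

-- ===== PRECONDITION & SPEC =====
def Spec_compute_groups_py (k : List String) (lnk : List Bool) (out : List (List String)) : Prop := out = compute_groups_py_alt k lnk
instance (k : List String) (lnk : List Bool) (out : List (List String)) : Decidable (Spec_compute_groups_py k lnk out) := by unfold Spec_compute_groups_py; infer_instance

-- ===== CLAIM (what is proved, stated in full; the proofs are below) =====
def Claim_equal_compute_groups_py : Prop := ∀ (k : List String) (lnk : List Bool), Dom_compute_groups_py k lnk → Spec_compute_groups_py k lnk (compute_groups_py k lnk)

-- ===== LEMMAS AND PROOFS =====

-- adjacent pairs of a list; recursive form of `xs.zip xs.tail` used in the invariant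
def pvAdj {α : Type} : List α → List (α × α)
  | a :: b :: t => (a, b) :: pvAdj (b :: t)
  | _ => []

lemma pvAdj_eq_zip {α : Type} : ∀ xs : List α, pvAdj xs = xs.zip xs.tail
  | [] => rfl
  | [_] => rfl
  | a :: b :: t => by
    rw [pvAdj, pvAdj_eq_zip (b :: t)]
    rfl

lemma pvAdj_snoc {α : Type} : ∀ (xs : List α) (a b : α),
    pvAdj (xs ++ [a] ++ [b]) = pvAdj (xs ++ [a]) ++ [(a, b)]
  | [], a, b => rfl
  | [x], a, b => rfl
  | x :: y :: t, a, b => by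
    have ih := pvAdj_snoc (y :: t) a b
    have e1 : (x :: y :: t) ++ [a] ++ [b] = x :: y :: (t ++ [a] ++ [b]) := by simp
    have e2 : (x :: y :: t) ++ [a] = x :: y :: (t ++ [a]) := by simp
    have e3 : (y :: t) ++ [a] ++ [b] = y :: (t ++ [a] ++ [b]) := by simp
    have e4 : (y :: t) ++ [a] = y :: (t ++ [a]) := by simp
    rw [e3, e4] at ih
    rw [e1, e2, pvAdj, pvAdj, ih]
    simp

-- the joint loop invariant relating A's (groups, current) state to B's boundary list
lemma pvInv (k : List String) (lnk : List Bool) (k0 : String) (rest : List String)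
    (hk : k = k0 :: rest) :
    ∀ m : Nat, 1 ≤ m → m ≤ k.length →
      ∃ (bs : List Int) (L : Nat),
        (PySem.List.pyRange 1 (m : Int) 1).foldl (pvStepB lnk) [0] = bs ++ [(L : Int)] ∧
        L < m ∧
        (PySem.List.pyRange 1 (m : Int) 1).foldl (pvStepA k lnk) ([], [k0]) =
          ((pvAdj (bs ++ [(L : Int)])).map
             (fun ab => PySem.List.slice k (some ab.1) (some ab.2)),
           (k.drop L).take (m - L)) := by
  intro m
  induction m with
  | zero => omega
  | succ m ih =>
    intro _ hle
    by_cases hm1 : m = 0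
    · subst hm1
      refine ⟨[], 0, ?_, by omega, ?_⟩
      · simp [PySem.List.pyRange_one_eq_nil (by norm_num : (1:Int) ≤ 1)]
      · simp [PySem.List.pyRange_one_eq_nil (by norm_num : (1:Int) ≤ 1), pvAdj, hk]
    · obtain ⟨bs, L, hB, hL, hA⟩ := ih (by omega) (by omega)
      have hrange : PySem.List.pyRange 1 ((m + 1 : Nat) : Int) 1 =
          PySem.List.pyRange 1 (m : Int) 1 ++ [(m : Int)] := by
        have : ((m + 1 : Nat) : Int) = (m : Int) + 1 := by push_cast; ring
        rw [this, PySem.List.pyRange_one_succ_right (by exact_mod_cast Nat.one_le_iff_ne_zero.mpr hm1)]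
      have hmlen : m < k.length := by omega
      have hgetm : PySem.List.pyGetD k (m : Int) "" = k[m] := by
        simp [List.getD_eq_getElem?_getD, List.getElem?_eq_getElem hmlen]
      by_cases hc : (m : Int) - 1 < (lnk.length : Int) ∧ PySem.List.pyGetD lnk ((m : Int) - 1) false = true
      · -- linked: current grows, boundaries unchanged
        refine ⟨bs, L, ?_, by omega, ?_⟩
        · rw [hrange, List.foldl_append, hB]
          simp [pvStepB, hc]
        · rw [hrange, List.foldl_append, hA]
          simp only [pvStepA, if_pos hc, List.foldl_cons, List.foldl_nil]
          refine Prod.ext rfl ?_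
          simp only [hgetm]
          have hLm : L ≤ m := by omega
          have hidx : (k.drop L)[m - L]? = some k[m] := by
            rw [List.getElem?_drop]
            have : L + (m - L) = m := by omega
            rw [this, List.getElem?_eq_getElem hmlen]
          have : m + 1 - L = (m - L) + 1 := by omega
          rw [this, List.take_add_one, hidx]
          rfl
      · -- boundary: current is flushed, new boundary m
        refine ⟨bs ++ [(L : Int)], m, ?_, by omega, ?_⟩
        · rw [hrange, List.foldl_append, hB]
          simp only [List.foldl_cons, List.foldl_nil, pvStepB, if_pos hc]
        · rw [hrange, List.foldl_append, hA]
          simp only [pvStepA, if_neg hc, List.foldl_cons, List.foldl_nil]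
          refine Prod.ext ?_ ?_
          · simp only [pvAdj_snoc bs ((L : Int)) ((m : Int)), List.map_append, List.map_cons,
              List.map_nil]
            rw [PySem.List.slice_natCast]
          · simp only [hgetm]
            rw [show m + 1 - m = 1 from by omega, List.take_one, List.head?_drop]
            simp [List.getElem?_eq_getElem hmlen]

-- ===== VERDICT (by name: the statement is the Claim_ definition above) =====
theorem compute_groups_py_spec : Claim_equal_compute_groups_py := by
  intro k lnk _
  unfold Spec_compute_groups_py
  cases k with
  | nil => rfl
  | cons k0 rest =>
    obtain ⟨bs, L, hB, hL, hA⟩ :=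
      pvInv (k0 :: rest) lnk k0 rest rfl (k0 :: rest).length (by simp) le_rfl
    simp only [compute_groups_py, compute_groups_py_alt]
    rw [hA, hB, ← pvAdj_eq_zip, pvAdj_snoc, List.map_append]
    simp
    rw [show ((rest.length : Int) + 1) = ((rest.length + 1 : Nat) : Int) from by push_cast; ring,
        PySem.List.slice_natCast]
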